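-- pv_equiv track=rewrite | github.com/naverwhale/whaleos-chromite | lib/cros_build_lib.py | ShellUnquote
-- ===== SOURCE A (Python) =====
-- _SHELL_ESCAPE_CHARS = r"\"`$"
--
-- def ShellUnquote(s):
--     """Do the opposite of ShellQuote.
--
--     This function assumes that the input is a valid, escaped string. The
--     behaviour is undefined on malformed strings.
--
--     Args:
--         s: An escaped string.
--
--     Returns:
--         The unescaped version of the string.
--     """
--     if not s:
--         return ""
--
--     if s[0] == "'":
--         return s[1:-1]
--
--     if s[0] != '"':
--         return s
--
--     s = s[1:-1]
--     output = ""
--     i = 0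
--     while i < len(s) - 1:
--         # Skip the backslash when it makes sense.
--         if s[i] == "\\" and s[i + 1] in _SHELL_ESCAPE_CHARS:
--             i += 1
--         output += s[i]
--         i += 1
--     return output + s[i] if i < len(s) else output
-- ===== SOURCE B (Python) =====
-- _SHELL_ESCAPE_CHARS = r"\"`$"
--
-- def ShellUnquote(s):
--     """Unescape a shell-quoted string (state-machine re-implementation)."""
--     if not s:
--         return ""
--     if s[0] == "'":
--         return s[1:-1]
--     if s[0] != '"':
--         return s
--     out = []
--     pending = False
--     for c in s[1:-1]:
--         if pending:
--             if c in _SHELL_ESCAPE_CHARS: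
--                 out.append(c)
--             else:
--                 out.append("\\")
--                 out.append(c)
--             pending = False
--         elif c == "\\":
--             pending = True
--         else:
--             out.append(c)
--     if pending:
--         out.append("\\")
--     return "".join(out)
-- ===== Notes on version B (the rewrite author's own statement) =====
-- stated objective: alternative
-- what changed: The double-quoted branch's index-based while-loop with lookahead (s[i], s[i+1], manual i skipping) is replaced by a single for-each pass over the characters using a pending-backslash state flag.
import Mathlib
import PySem

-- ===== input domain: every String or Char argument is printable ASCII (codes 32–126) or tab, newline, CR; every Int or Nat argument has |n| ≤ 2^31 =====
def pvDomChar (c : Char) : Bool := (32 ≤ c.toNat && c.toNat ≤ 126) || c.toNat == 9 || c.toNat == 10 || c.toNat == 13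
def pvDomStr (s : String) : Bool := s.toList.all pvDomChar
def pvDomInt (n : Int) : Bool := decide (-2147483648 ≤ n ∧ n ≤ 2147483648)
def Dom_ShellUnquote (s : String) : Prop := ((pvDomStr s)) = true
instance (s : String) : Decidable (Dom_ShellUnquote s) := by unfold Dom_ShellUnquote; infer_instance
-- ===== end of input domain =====

-- B replaces A's index-based lookahead loop by a single-pass pending-backslash state machine; objective: alternative.

-- ===== PORT A =====
-- the module constant _SHELL_ESCAPE_CHARS = r"\"`$"
def shellEscapeChars : List Char := ['\\', '"', '`', '$']

-- the while-loop of A: i-indexed scan with lookahead (getD is safe: guards keep indices in range)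
def shellUnquoteLoop (b : List Char) (i : Nat) (out : List Char) : List Char :=
  if i + 1 < b.length then
    if b.getD i ' ' = '\\' ∧ b.getD (i + 1) ' ' ∈ shellEscapeChars then
      shellUnquoteLoop b (i + 2) (out ++ [b.getD (i + 1) ' '])
    else
      shellUnquoteLoop b (i + 1) (out ++ [b.getD i ' '])
  else if i < b.length then out ++ [b.getD i ' ']
  else out
termination_by b.length - i

def ShellUnquote (s : String) : String :=
  match s.toList with
  | [] => ""
  | c :: _ =>
    if c = '\'' then String.ofList (PySem.List.slice s.toList (some 1) (some (-1)))
    else if c ≠ '"' then s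
    else String.ofList (shellUnquoteLoop (PySem.List.slice s.toList (some 1) (some (-1))) 0 [])

-- ===== PORT B =====
-- one step of B's for-loop over the characters: state = (pending backslash?, output so far)
def shellUnquoteStep (st : Bool × List Char) (c : Char) : Bool × List Char :=
  if st.1 then
    (false, st.2 ++ (if c ∈ shellEscapeChars then [c] else ['\\', c]))
  else if c = '\\' then (true, st.2)
  else (false, st.2 ++ [c])

def ShellUnquote_alt (s : String) : String :=
  match s.toList with
  | [] => ""
  | c :: _ =>
    if c = '\'' then String.ofList (PySem.List.slice s.toList (some 1) (some (-1)))
    else if c ≠ '"' then s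
    else
      let r := (PySem.List.slice s.toList (some 1) (some (-1))).foldl shellUnquoteStep (false, [])
      String.ofList (if r.1 then r.2 ++ ['\\'] else r.2)

-- ===== PRECONDITION & SPEC =====
def Spec_ShellUnquote (s : String) (out : String) : Prop := out = ShellUnquote_alt s
instance (s : String) (out : String) : Decidable (Spec_ShellUnquote s out) := by unfold Spec_ShellUnquote; infer_instance

-- ===== CLAIM (what is proved, stated in full; the proofs are below) =====
def Claim_equal_ShellUnquote : Prop := ∀ (s : String), Dom_ShellUnquote s → Spec_ShellUnquote s (ShellUnquote s)

-- ===== LEMMAS AND PROOFS =====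

-- reference unescape function: both ports' quoted-branch scans compute it
def unesc : List Char → List Char
  | [] => []
  | [a] => [a]
  | a :: c :: r =>
    if a = '\\' then
      if c ∈ shellEscapeChars then c :: unesc r
      else '\\' :: unesc (c :: r)
    else a :: unesc (c :: r)
termination_by l => l.length

lemma unesc_cons_ne (c : Char) (r : List Char) (h : c ≠ '\\') :
    unesc (c :: r) = c :: unesc r := by
  cases r with
  | nil => simp [unesc]
  | cons d t => simp [unesc, h]

lemma unesc_esc (c : Char) (r : List Char) (h : c ∈ shellEscapeChars) :
    unesc ('\\' :: c :: r) = c :: unesc r := by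
  simp [unesc, h]

lemma unesc_bs_ne (c : Char) (r : List Char) (h : c ∉ shellEscapeChars) :
    unesc ('\\' :: c :: r) = '\\' :: unesc (c :: r) := by
  simp [unesc, h]

lemma loopA_aux (n : Nat) : ∀ (b : List Char) (i : Nat) (out : List Char),
    b.length ≤ i + n → shellUnquoteLoop b i out = out ++ unesc (b.drop i) := by
  induction n with
  | zero =>
    intro b i out h
    rw [shellUnquoteLoop]
    have h1 : ¬ i + 1 < b.length := by omega
    have h2 : ¬ i < b.length := by omega
    simp [h1, h2, List.drop_eq_nil_of_le (by omega : b.length ≤ i), unesc]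
  | succ n ih =>
    intro b i out h
    rw [shellUnquoteLoop]
    by_cases h1 : i + 1 < b.length
    · have hib : i < b.length := by omega
      have hd : b.drop i = b[i] :: b[i+1] :: b.drop (i + 2) := by
        rw [List.drop_eq_getElem_cons hib, List.drop_eq_getElem_cons h1]
      have hd1 : b.drop (i + 1) = b[i+1] :: b.drop (i + 2) := List.drop_eq_getElem_cons h1
      rw [List.getD_eq_getElem b ' ' hib, List.getD_eq_getElem b ' ' h1, hd]
      by_cases hesc : b[i] = '\\' ∧ b[i+1] ∈ shellEscapeChars
      · obtain ⟨he1, he2⟩ := hesc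
        rw [if_pos h1, if_pos ⟨he1, he2⟩, ih b (i + 2) _ (by omega), he1,
            unesc_esc _ _ he2, List.append_assoc]
        rfl
      · rw [if_pos h1, if_neg hesc, ih b (i + 1) _ (by omega), hd1]
        by_cases hbs : b[i] = '\\'
        · have hne : b[i+1] ∉ shellEscapeChars := fun hh => hesc ⟨hbs, hh⟩
          rw [hbs, unesc_bs_ne _ _ hne, ← hd1, List.append_assoc]
          rfl
        · rw [unesc_cons_ne _ _ hbs, ← hd1, List.append_assoc]
          rfl
    · rw [if_neg h1]
      by_cases h2 : i < b.length
      · have hd : b.drop i = [b[i]] := by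
          rw [List.drop_eq_getElem_cons h2, List.drop_eq_nil_of_le (by omega : b.length ≤ i + 1)]
        rw [if_pos h2, List.getD_eq_getElem b ' ' h2, hd]
        simp [unesc]
      · rw [if_neg h2, List.drop_eq_nil_of_le (by omega : b.length ≤ i)]
        simp [unesc]

lemma loopA_eq (b : List Char) : shellUnquoteLoop b 0 [] = unesc b := by
  simpa using loopA_aux b.length b 0 [] (by omega)

-- finalization of B's state
def finB (st : Bool × List Char) : List Char := if st.1 then st.2 ++ ['\\'] else st.2

lemma step_true (out : List Char) (c : Char) :
    shellUnquoteStep (true, out) c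
      = (false, out ++ (if c ∈ shellEscapeChars then [c] else ['\\', c])) := rfl

lemma step_false (out : List Char) (c : Char) :
    shellUnquoteStep (false, out) c
      = if c = '\\' then (true, out) else (false, out ++ [c]) := rfl

lemma foldB_eq (l : List Char) : ∀ (p : Bool) (out : List Char),
    finB (l.foldl shellUnquoteStep (p, out)) = out ++ unesc (cond p ('\\' :: l) l) := by
  induction l with
  | nil =>
    intro p out
    cases p <;> simp [finB, unesc]
  | cons c r ih =>
    intro p out
    cases p with
    | true =>
      rw [List.foldl_cons, step_true, ih false]
      by_cases hesc : c ∈ shellEscapeChars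
      · simp [hesc, unesc_esc c r hesc]
      · have hne : c ≠ '\\' := fun h => hesc (by simp [h, shellEscapeChars])
        simp [hesc, unesc_bs_ne c r hesc, unesc_cons_ne c r hne]
    | false =>
      rw [List.foldl_cons, step_false]
      by_cases hbs : c = '\\'
      · rw [if_pos hbs, ih true, hbs]
        simp
      · rw [if_neg hbs, ih false]
        simp [unesc_cons_ne c r hbs]

-- ===== VERDICT (by name: the statement is the Claim_ definition above) =====
theorem ShellUnquote_spec : Claim_equal_ShellUnquote := by
  intro s _
  unfold Spec_ShellUnquote ShellUnquote ShellUnquote_alt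
  cases hs : s.toList with
  | nil => rfl
  | cons c rest =>
    by_cases h1 : c = '\''
    · simp [h1]
    · by_cases h2 : c = '"'
      · subst h2
        have hA := loopA_eq (PySem.List.slice ('"' :: rest) (some 1) (some (-1)))
        have hB := foldB_eq (PySem.List.slice ('"' :: rest) (some 1) (some (-1))) false []
        simp only [cond, List.nil_append, finB] at hB
        simp [h1, hA, hB]
      · simp [h1, h2]
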